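-- pv_equiv track=rewrite | github.com/Gravitar64/A-beautiful-code-in-Python | Teil_31_Mastermind lösen.py | maximale_differenz
-- ===== SOURCE A (Python) =====
-- def maximale_differenz(l,v):
--   max_diff = 0
--
--   for mögliche_lösung in l:
--     diff = sum(abs(a-b) for versuch in v for a,b in zip(mögliche_lösung,versuch) )
--     if diff > max_diff:
--       max_diff = diff
--       best_lösung = mögliche_lösung
--   return best_lösung
-- ===== SOURCE B (Python) =====
-- def maximale_differenz(l, v):
--     # widest guess determines how many positions carry any data
--     width = 0
--     for versuch in v:
--         if len(versuch) > width:
--             width = len(versuch)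
--     # per position j: a counting table value -> multiplicity over all guesses
--     counters = []
--     for j in range(width):
--         cnt = {}
--         for versuch in v:
--             if j < len(versuch):
--                 x = versuch[j]
--                 cnt[x] = cnt.get(x, 0) + 1
--         counters.append(cnt)
--     # pick the first candidate maximizing the total distance
--     best, best_diff = None, -1
--     for kandidat in l:
--         diff = 0
--         for j, a in enumerate(kandidat):
--             if j < width:
--                 for wert, anzahl in counters[j].items():
--                     diff += abs(a - wert) * anzahl
--         if diff > best_diff:
--             best_diff = diff
--             best = kandidat
--     return best
-- ===== Notes on version B (the rewrite author's own statement) =====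
-- stated objective: alternative
-- what changed: B precomputes one per-position counting table (value -> multiplicity over all guesses) and scores each candidate by summing |a-value|*multiplicity over the table entries, replacing A's per-candidate rescan of every guess; it also tracks the best candidate with an argmax initialised to -1 instead of A's unbound-variable pattern.
-- crash fix: When no candidate differs from any guess at a shared position (e.g. v empty or all guesses equal to every candidate), A raises UnboundLocalError; B returns the first candidate if l is nonempty. — e.g. on maximale_differenz([[1]], []): A raises UnboundLocalError, B returns [1]
import Mathlib
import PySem

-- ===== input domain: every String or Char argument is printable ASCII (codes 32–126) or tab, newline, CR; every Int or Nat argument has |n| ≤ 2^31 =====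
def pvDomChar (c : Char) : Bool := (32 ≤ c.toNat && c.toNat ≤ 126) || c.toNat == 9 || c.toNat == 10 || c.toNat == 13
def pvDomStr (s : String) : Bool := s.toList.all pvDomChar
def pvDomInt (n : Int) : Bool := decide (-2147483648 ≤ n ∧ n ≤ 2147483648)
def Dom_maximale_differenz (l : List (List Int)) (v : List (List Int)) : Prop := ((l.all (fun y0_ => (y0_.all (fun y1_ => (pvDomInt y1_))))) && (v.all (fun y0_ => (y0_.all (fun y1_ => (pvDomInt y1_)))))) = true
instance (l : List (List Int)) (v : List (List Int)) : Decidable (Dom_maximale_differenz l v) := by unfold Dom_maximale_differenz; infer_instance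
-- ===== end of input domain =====

-- B replaces A's per-candidate rescan of every guess by one precomputed per-position
-- counting table (value -> multiplicity), then scores each candidate against the tables
-- (objective: alternative; same result on Pre_).

-- ===== PORT A =====
-- diff = sum(abs(a-b) for versuch in v for a,b in zip(mögliche_lösung, versuch))
def pvDiffA (v : List (List Int)) (c : List Int) : Int :=
  (v.flatMap (fun g => (c.zip g).map (fun ab => |ab.1 - ab.2|))).sum

-- 'best_lösung' starts unbound: modelled as 'none'; the final '.getD []' is only
-- reached outside Pre_ (where the Python raises UnboundLocalError).
def maximale_differenz (l : List (List Int)) (v : List (List Int)) : List Int :=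
  ((l.foldl (fun (st : Int × Option (List Int)) c =>
      if pvDiffA v c > st.1 then (pvDiffA v c, some c) else st) (0, none)).2).getD []

-- ===== PORT B =====
-- width = 0; for versuch in v: if len(versuch) > width: width = len(versuch)
def pvWidth (v : List (List Int)) : Int :=
  v.foldl (fun w g => if (g.length : Int) > w then (g.length : Int) else w) 0

-- counters = []; for j in range(width): cnt = {}; for versuch in v: ...; counters.append(cnt)
-- versuch[j] under the guard 0 <= j < len(versuch): pyGetD is exact there
def pvCounters (v : List (List Int)) : List (PySem.Dict Int Int) :=
  (PySem.List.pyRange 0 (pvWidth v) 1).foldl (fun acc j =>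
    acc ++ [v.foldl (fun cnt g =>
      if j < (g.length : Int) then
        cnt.insert (PySem.List.pyGetD g j 0) (cnt.getD (PySem.List.pyGetD g j 0) 0 + 1)
      else cnt) PySem.Dict.empty]) []

-- diff = 0; for j, a in enumerate(kandidat): if j < width: for wert, anzahl in counters[j].items(): diff += abs(a-wert)*anzahl
-- counters[j] under the guard 0 <= j < width = len(counters): pyGetD is exact there
def pvDiffB (width : Int) (counters : List (PySem.Dict Int Int)) (c : List Int) : Int :=
  (PySem.List.enumerate c).foldl (fun acc ja =>
    if ja.1 < width then
      ((PySem.List.pyGetD counters ja.1 PySem.Dict.empty).items).foldl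
        (fun acc p => acc + |ja.2 - p.1| * p.2) acc
    else acc) 0

-- 'best = None' is 'none'; the final '.getD []' is only reached outside Pre_ (l = [])
def maximale_differenz_alt (l : List (List Int)) (v : List (List Int)) : List Int :=
  ((l.foldl (fun (st : Option (List Int) × Int) c =>
      if pvDiffB (pvWidth v) (pvCounters v) c > st.2 then (some c, pvDiffB (pvWidth v) (pvCounters v) c)
      else st) (none, -1)).1).getD []

-- ===== PRECONDITION & SPEC =====
-- Pre_ excludes exactly the inputs on which A raises UnboundLocalError: those where no
-- candidate differs from any guess at a shared position (then no diff is ever > 0 and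
-- 'best_lösung' is never bound).
def Pre_maximale_differenz (l : List (List Int)) (v : List (List Int)) : Prop :=
  ∃ c ∈ l, ∃ g ∈ v, ∃ p ∈ c.zip g, p.1 ≠ p.2
instance (l : List (List Int)) (v : List (List Int)) : Decidable (Pre_maximale_differenz l v) := by
  unfold Pre_maximale_differenz; infer_instance

def pvWitness_maximale_differenz : List (List Int) × List (List Int) := ([[0], [1]], [[0]])

-- When no candidate differs from any guess at a shared position, A raises
-- UnboundLocalError; B returns the first candidate if l is nonempty.
def Raises_maximale_differenz (l : List (List Int)) (v : List (List Int)) : Prop :=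
  l ≠ [] ∧ ∀ c ∈ l, ∀ g ∈ v, ∀ p ∈ c.zip g, p.1 = p.2
instance (l : List (List Int)) (v : List (List Int)) : Decidable (Raises_maximale_differenz l v) := by
  unfold Raises_maximale_differenz; infer_instance

def pvRaiseWitness_maximale_differenz : List (List Int) × List (List Int) := ([[1]], [])
def pvRaiseWitnessOut_maximale_differenz : List Int := [1]

def Spec_maximale_differenz (l : List (List Int)) (v : List (List Int)) (out : List Int) : Prop := out = maximale_differenz_alt l v
instance (l : List (List Int)) (v : List (List Int)) (out : List Int) : Decidable (Spec_maximale_differenz l v out) := by unfold Spec_maximale_differenz; infer_instance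

-- ===== CLAIM (what is proved, stated in full; the proofs are below) =====
def Claim_equal_maximale_differenz : Prop := ∀ (l : List (List Int)) (v : List (List Int)), Dom_maximale_differenz l v → Pre_maximale_differenz l v → Spec_maximale_differenz l v (maximale_differenz l v)

def Claim_raises_maximale_differenz : Prop := (∀ (l : List (List Int)) (v : List (List Int)), Dom_maximale_differenz l v → Raises_maximale_differenz l v → ¬ Pre_maximale_differenz l v) ∧ (Dom_maximale_differenz (pvRaiseWitness_maximale_differenz.1) (pvRaiseWitness_maximale_differenz.2) ∧ Raises_maximale_differenz (pvRaiseWitness_maximale_differenz.1) (pvRaiseWitness_maximale_differenz.2) ∧ maximale_differenz_alt (pvRaiseWitness_maximale_differenz.1) (pvRaiseWitness_maximale_differenz.2) = pvRaiseWitnessOut_maximale_differenz)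

-- ===== LEMMAS AND PROOFS =====

-- the column of values the guesses carry at position k
def pvColAt (v : List (List Int)) (k : Nat) : List Int := v.filterMap (fun g => g[k]?)

-- every guess length is bounded by pvWidth
lemma pvWidth_max (v : List (List Int)) :
    0 ≤ pvWidth v ∧ ∀ g ∈ v, (g.length : Int) ≤ pvWidth v := by
  have hmax : ∀ (w : Int) (g : List Int),
      (if (g.length : Int) > w then (g.length : Int) else w) = max w (g.length : Int) := by
    intro w g; rw [max_def]; split <;> split <;> omega
  unfold pvWidth
  simp only [hmax]
  exact PySem.List.le_foldl_max_int v (fun g => (g.length : Int)) 0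

-- the per-position counting loop is Counter(column)
lemma pvCnt_eq_counter (v : List (List Int)) (j : Int) (hj : 0 ≤ j) :
    v.foldl (fun cnt g =>
      if j < (g.length : Int) then
        cnt.insert (PySem.List.pyGetD g j 0) (cnt.getD (PySem.List.pyGetD g j 0) 0 + 1)
      else cnt) PySem.Dict.empty = PySem.Dict.counter (pvColAt v j.toNat) := by
  rw [← PySem.Dict.foldl_insert_getD_add_one_eq_counter]
  generalize (PySem.Dict.empty : PySem.Dict Int Int) = d
  induction v generalizing d with
  | nil => rfl
  | cons g t ih =>
    simp only [List.foldl_cons, pvColAt, List.filterMap_cons]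
    by_cases hlt : j < (g.length : Int)
    · have hn : j.toNat < g.length := by omega
      have hx : PySem.List.pyGetD g j 0 = g[j.toNat] := by
        have h1 := PySem.List.pyGetD_natCast g j.toNat (0 : Int)
        rw [Int.toNat_of_nonneg hj] at h1
        rw [h1, List.getD_eq_getElem g 0 hn]
      rw [if_pos hlt, List.getElem?_eq_getElem hn]
      simp only [hx, List.foldl_cons]
      exact ih _
    · have hn : ¬ j.toNat < g.length := by omega
      rw [if_neg hlt, List.getElem?_eq_none_iff.mpr (by omega)]
      exact ih d

-- summing |a - wert| * anzahl over Counter(xs).items is summing |a - y| over xs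
lemma pvItems_sum (xs : List Int) (a : Int) :
    ((PySem.Dict.counter xs).items.map (fun p => |a - p.1| * p.2)).sum
      = (xs.map (fun y => |a - y|)).sum := by
  rw [PySem.Dict.items_counter, List.map_map]
  have hfin : (PySem.Set.ofList xs).toFinset = xs.toFinset := by
    ext y
    simp [List.mem_toFinset, PySem.Set.mem_ofList]
  rw [← List.sum_toFinset _ (PySem.Set.nodup_ofList xs), hfin,
    Finset.sum_list_map_count xs (fun y => |a - y|)]
  apply Finset.sum_congr rfl
  intro m hm
  simp [mul_comm]

-- one guess: the zip sum, written per position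
lemma pvZip_sum (c g : List Int) :
    ((c.zip g).map (fun ab => |ab.1 - ab.2|)).sum
      = ∑ k ∈ Finset.range c.length,
          (if k < g.length then |c.getD k 0 - g.getD k 0| else 0) := by
  induction c generalizing g with
  | nil => simp
  | cons x c' ih =>
    cases g with
    | nil => simp
    | cons y g' =>
      simp only [List.zip_cons_cons, List.map_cons, List.sum_cons, List.length_cons]
      rw [Finset.sum_range_succ', ih g']
      simp [add_comm]

-- exchange of summation: per guess and then per position = per position over the column
lemma pvExchange (v : List (List Int)) (c : List Int) :
    pvDiffA v c
      = ∑ k ∈ Finset.range c.length,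
          ((pvColAt v k).map (fun y => |c.getD k 0 - y|)).sum := by
  unfold pvDiffA
  induction v with
  | nil => simp [pvColAt]
  | cons g t ih =>
    simp only [List.flatMap_cons, List.sum_append]
    rw [ih, pvZip_sum, ← Finset.sum_add_distrib]
    apply Finset.sum_congr rfl
    intro k hk
    simp only [pvColAt, List.filterMap_cons]
    by_cases h : k < g.length
    · rw [List.getElem?_eq_getElem h]
      simp [h]
    · rw [List.getElem?_eq_none_iff.mpr (by omega)]
      simp [h]

-- B's per-candidate score is A's
lemma pvDiff_eq (v : List (List Int)) (c : List Int) :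
    pvDiffB (pvWidth v) (pvCounters v) c = pvDiffA v c := by
  obtain ⟨h0, hmax⟩ := pvWidth_max v
  unfold pvDiffB
  rw [PySem.List.enumerate_eq_map_pyRange c 0, List.foldl_map]
  rw [PySem.List.foldl_congr_mem _ _
    (fun (acc j : Int) => acc +
      (if j < pvWidth v then
        ((PySem.List.pyGetD (pvCounters v) j PySem.Dict.empty).items.map
          (fun p => |PySem.List.pyGetD c j 0 - p.1| * p.2)).sum
       else 0)) _ ?hfg]
  case hfg =>
    intro acc j hj
    by_cases h : j < pvWidth v
    · simp only [h, if_pos]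
      exact PySem.List.foldl_add _ _ _
    · simp only [h, if_neg, not_false_iff, add_zero]
  rw [PySem.List.foldl_add, zero_add]
  have hlen : PySem.List.len c = ((c.length : Nat) : Int) := by simp [PySem.List.len_eq]
  rw [hlen, PySem.List.pyRange_zero_natCast, List.map_map]
  have hbr : ((List.range c.length).map ((fun j =>
      if j < pvWidth v then
        (List.map (fun p => |PySem.List.pyGetD c j 0 - p.1| * p.2)
          (PySem.List.pyGetD (pvCounters v) j PySem.Dict.empty).items).sum
      else 0) ∘ (fun k : Nat => (k : Int)))).sum
      = ∑ k ∈ Finset.range c.length,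
          (if (k : Int) < pvWidth v then
            (List.map (fun p => |PySem.List.pyGetD c (k : Int) 0 - p.1| * p.2)
              (PySem.List.pyGetD (pvCounters v) (k : Int) PySem.Dict.empty).items).sum
          else 0) := rfl
  rw [hbr, pvExchange v c]
  apply Finset.sum_congr rfl
  intro k hk
  have hk' : k < c.length := Finset.mem_range.mp hk
  by_cases h : ((k : Nat) : Int) < pvWidth v
  · have hcnt : PySem.List.pyGetD (pvCounters v) (k : Int) PySem.Dict.empty
        = PySem.Dict.counter (pvColAt v k) := by
      unfold pvCounters
      rw [PySem.List.foldl_append_singleton_eq_map, List.nil_append]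
      have hw : pvWidth v = (((pvWidth v).toNat : Nat) : Int) := (Int.toNat_of_nonneg h0).symm
      rw [hw, PySem.List.pyGetD_map_pyRange _ _ _ _ (by omega)]
      rw [pvCnt_eq_counter v (k : Int) (by omega)]
      simp
    rw [if_pos h, hcnt, pvItems_sum, PySem.List.pyGetD_natCast]
  · have hnil : pvColAt v k = [] := by
      unfold pvColAt
      rw [List.filterMap_eq_nil_iff]
      intro g hg
      have := hmax g hg
      rw [List.getElem?_eq_none_iff]
      omega
    rw [if_neg h, hnil]
    simp

-- A's score is a sum of absolute values
lemma pvDiffA_nonneg (v : List (List Int)) (c : List Int) : 0 ≤ pvDiffA v c := by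
  apply List.sum_nonneg
  intro x hx
  simp only [List.mem_flatMap, List.mem_map] at hx
  obtain ⟨g, -, ab, -, rfl⟩ := hx
  exact abs_nonneg _

-- once the two running states carry the same best-so-far and the same maximum, the
-- two selection loops stay in lock step
lemma pvSel_aligned (D : List Int → Int) (l : List (List Int)) (m : Int) (ob : Option (List Int)) :
    (l.foldl (fun (st : Int × Option (List Int)) c =>
        if D c > st.1 then (D c, some c) else st) (m, ob)).2
      = (l.foldl (fun (st : Option (List Int) × Int) c =>
        if D c > st.2 then (some c, D c) else st) (ob, m)).1 := by
  induction l generalizing m ob with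
  | nil => rfl
  | cons c t ih =>
    simp only [List.foldl_cons]
    by_cases h : D c > m
    · simp only [h, if_pos]; exact ih (D c) (some c)
    · simp only [h, if_neg, not_false_iff]; exact ih m ob

-- while the maximum is 0 and some positive score is still ahead, the carried options
-- (A: none, B: the first candidate) do not matter
lemma pvSel_zero (D : List Int → Int) (l : List (List Int)) (obA obB : Option (List Int))
    (h : ∃ c ∈ l, 0 < D c) :
    (l.foldl (fun (st : Int × Option (List Int)) c =>
        if D c > st.1 then (D c, some c) else st) (0, obA)).2
      = (l.foldl (fun (st : Option (List Int) × Int) c =>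
        if D c > st.2 then (some c, D c) else st) (obB, 0)).1 := by
  induction l generalizing obA obB with
  | nil => exact absurd h (by simp)
  | cons c t ih =>
    simp only [List.foldl_cons]
    by_cases hc : D c > 0
    · simp only [hc, if_pos]; exact pvSel_aligned D t (D c) (some c)
    · simp only [hc, if_neg, not_false_iff]
      apply ih
      obtain ⟨c', hc', hpos⟩ := h
      rcases List.mem_cons.mp hc' with rfl | hmem
      · exact absurd hpos hc
      · exact ⟨c', hmem, hpos⟩

-- the selection loops agree whenever some candidate scores positively
lemma pvSel (D : List Int → Int) (l : List (List Int)) (hnn : ∀ c ∈ l, 0 ≤ D c)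
    (h : ∃ c ∈ l, 0 < D c) :
    (l.foldl (fun (st : Int × Option (List Int)) c =>
        if D c > st.1 then (D c, some c) else st) (0, none)).2
      = (l.foldl (fun (st : Option (List Int) × Int) c =>
        if D c > st.2 then (some c, D c) else st) (none, -1)).1 := by
  cases l with
  | nil => exact absurd h (by simp)
  | cons c t =>
    simp only [List.foldl_cons]
    have hnnc : 0 ≤ D c := hnn c (List.mem_cons_self ..)
    by_cases hc : 0 < D c
    · have h1 : D c > (0 : Int) := hc
      have h2 : D c > (-1 : Int) := by omega
      simp only [h1, h2, if_pos]
      exact pvSel_aligned D t (D c) (some c)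
    · have hz : D c = 0 := le_antisymm (by omega) hnnc
      have h1 : ¬ D c > (0 : Int) := by omega
      have h2 : D c > (-1 : Int) := by omega
      simp only [h1, h2, if_pos, if_neg, not_false_iff]
      rw [hz]
      apply pvSel_zero
      obtain ⟨c', hc', hpos⟩ := h
      rcases List.mem_cons.mp hc' with rfl | hmem
      · exact absurd hpos h1
      · exact ⟨c', hmem, hpos⟩

-- Pre_ provides a positively scoring candidate
lemma pvPre_pos (l v : List (List Int)) (h : Pre_maximale_differenz l v) :
    ∃ c ∈ l, 0 < pvDiffA v c := by
  obtain ⟨c, hc, g, hg, p, hp, hne⟩ := h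
  refine ⟨c, hc, ?_⟩
  have hmem : |p.1 - p.2| ∈ v.flatMap (fun g => (c.zip g).map (fun ab => |ab.1 - ab.2|)) := by
    simp only [List.mem_flatMap, List.mem_map]
    exact ⟨g, hg, p, hp, rfl⟩
  have hpos : 0 < |p.1 - p.2| := abs_pos.mpr (sub_ne_zero.mpr hne)
  have hle := List.single_le_sum (l := v.flatMap (fun g => (c.zip g).map (fun ab => |ab.1 - ab.2|)))
    (by intro x hx
        simp only [List.mem_flatMap, List.mem_map] at hx
        obtain ⟨g', -, ab, -, rfl⟩ := hx
        exact abs_nonneg _) _ hmem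
  unfold pvDiffA
  omega

-- ===== VERDICT (by name: the statement is the Claim_ definition above) =====
theorem maximale_differenz_spec : Claim_equal_maximale_differenz := by
  intro l v _ hpre
  unfold Spec_maximale_differenz maximale_differenz maximale_differenz_alt
  simp only [pvDiff_eq]
  rw [pvSel (pvDiffA v) l (fun c _ => pvDiffA_nonneg v c) (pvPre_pos l v hpre)]

theorem maximale_differenz_raises : Claim_raises_maximale_differenz := by
  unfold Claim_raises_maximale_differenz
  constructor
  · intro l v _ ⟨_, hall⟩ ⟨c, hc, g, hg, p, hp, hne⟩
    exact hne (hall c hc g hg p hp)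
  · exact ⟨by decide, by decide, by decide⟩

-- self-check: the raise-witness value is the one recorded above (reads the witness
-- conjunct off maximale_differenz_raises)
theorem pvRaiseWitnessOut_ok :
    maximale_differenz_alt pvRaiseWitness_maximale_differenz.1 pvRaiseWitness_maximale_differenz.2
      = pvRaiseWitnessOut_maximale_differenz :=
  maximale_differenz_raises.2.2.2
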